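-- pv_equiv track=rewrite | github.com/nkmathew/kikuyu-language-hub | backend/app/utils/nlp.py | _analyze_morphology
-- ===== SOURCE A (Python) =====
-- from typing import List, Dict, Optional, Tuple, Set
--
-- def _analyze_morphology(word: str) -> Dict[str, str]:
--     """Basic morphological analysis"""
--     analysis = {}
--
--     # Detect word type based on patterns
--     if any(word.startswith(p) for p in ['wa-', 'we-', 'wi-', 'wo-', 'wu-']):
--         analysis['type'] = 'personal'
--     elif any(word.startswith(p) for p in ['ka-', 'ke-', 'ki-', 'ko-', 'ku-']):
--         analysis['type'] = 'diminutive'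
--     elif any(word.startswith(p) for p in ['ma-', 'me-', 'mi-', 'mo-', 'mu-']):
--         analysis['type'] = 'plural'
--     elif any(word.endswith(s) for s in ['-ire', '-ete']):
--         analysis['tense'] = 'past'
--     elif any(word.endswith(s) for s in ['-aga', '-ia']):
--         analysis['aspect'] = 'habitual'
--
--     return analysis
-- ===== SOURCE B (Python) =====
-- _TYPE_BY_INITIAL = {'w': 'personal', 'k': 'diminutive', 'm': 'plural'}
--
--
-- def _analyze_morphology(word: str):
--     """Character-structure analysis: classify the prefix by its individual
--     characters (initial consonant + vowel + '-') and match suffixes on the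
--     reversed word, instead of scanning pattern lists."""
--     if len(word) >= 3 and word[2] == '-' and word[1] in 'aeiou':
--         t = _TYPE_BY_INITIAL.get(word[0])
--         if t is not None:
--             return {'type': t}
--     r = word[::-1]
--     if r.startswith('eri-') or r.startswith('ete-'):
--         return {'tense': 'past'}
--     if r.startswith('aga-') or r.startswith('ai-'):
--         return {'aspect': 'habitual'}
--     return {}
-- ===== Notes on version B (the rewrite author's own statement) =====
-- stated objective: alternative
-- what changed: Replaces A's five any()-scans over 19 literal patterns with a character-structure analysis: the prefix class is read off the word's individual characters (initial consonant mapped via a 3-entry table, vowel check, hyphen check) and the suffixes are matched as prefixes of the reversed word.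
import Mathlib
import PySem

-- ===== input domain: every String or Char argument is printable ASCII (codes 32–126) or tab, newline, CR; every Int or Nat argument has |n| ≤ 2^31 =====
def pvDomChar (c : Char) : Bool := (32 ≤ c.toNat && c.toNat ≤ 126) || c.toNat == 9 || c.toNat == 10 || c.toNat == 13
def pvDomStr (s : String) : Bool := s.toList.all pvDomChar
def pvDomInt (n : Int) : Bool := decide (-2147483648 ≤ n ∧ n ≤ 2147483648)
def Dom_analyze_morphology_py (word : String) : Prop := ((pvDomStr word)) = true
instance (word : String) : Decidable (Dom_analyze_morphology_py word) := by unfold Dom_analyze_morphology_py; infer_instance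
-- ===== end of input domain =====

-- B reads the prefix class off the word's individual characters (initial letter via a 3-entry
-- table, then vowel and hyphen checks) and matches the suffixes as prefixes of the reversed word,
-- instead of A's five any()-scans over 19 literal patterns (objective: alternative algorithm).

-- ===== PORT A =====
def analyze_morphology_py (word : String) : List (String × String) :=
  let analysis : PySem.Dict String String := PySem.Dict.empty
  let analysis :=
    if (["wa-", "we-", "wi-", "wo-", "wu-"].any fun p => PySem.Str.startswith word p) then
      analysis.insert "type" "personal"
    else if (["ka-", "ke-", "ki-", "ko-", "ku-"].any fun p => PySem.Str.startswith word p) then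
      analysis.insert "type" "diminutive"
    else if (["ma-", "me-", "mi-", "mo-", "mu-"].any fun p => PySem.Str.startswith word p) then
      analysis.insert "type" "plural"
    else if (["-ire", "-ete"].any fun p => PySem.Str.endswith word p) then
      analysis.insert "tense" "past"
    else if (["-aga", "-ia"].any fun p => PySem.Str.endswith word p) then
      analysis.insert "aspect" "habitual"
    else
      analysis
  analysis.items

-- ===== PORT B =====
def pvTypeByInitial : PySem.Dict Char String :=
  PySem.Dict.ofList [('w', "personal"), ('k', "diminutive"), ('m', "plural")]

def analyze_morphology_py_alt (word : String) : List (String × String) :=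
  let hit : Option String :=
    if 3 ≤ PySem.Str.len word ∧ PySem.Str.pyGet? word 2 = some '-' ∧
        ((PySem.Str.pyGet? word 1).any fun ch => PySem.Chars.isIn [ch] "aeiou".toList) then
      (PySem.Str.pyGet? word 0).bind fun ch => PySem.Dict.get? pvTypeByInitial ch
    else none
  match hit with
  | some t => [("type", t)]
  | none =>
    match PySem.Str.slice? word none none (-1) with
    | none => []
    | some r =>
      if PySem.Str.startswith r "eri-" || PySem.Str.startswith r "ete-" then
        [("tense", "past")]
      else if PySem.Str.startswith r "aga-" || PySem.Str.startswith r "ai-" then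
        [("aspect", "habitual")]
      else []


-- ===== PRECONDITION & SPEC =====
def Spec_analyze_morphology_py (word : String) (out : List (String × String)) : Prop := out = analyze_morphology_py_alt word
instance (word : String) (out : List (String × String)) : Decidable (Spec_analyze_morphology_py word out) := by unfold Spec_analyze_morphology_py; infer_instance

-- ===== CLAIM (what is proved, stated in full; the proofs are below) =====
def Claim_equal_analyze_morphology_py : Prop := ∀ (word : String), Dom_analyze_morphology_py word → Spec_analyze_morphology_py word (analyze_morphology_py word)

-- ===== LEMMAS AND PROOFS =====
theorem pv_startswith_reverse (cs p : List Char) :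
    PySem.Chars.startswith cs.reverse p.reverse = PySem.Chars.endswith cs p := by
  rw [Bool.eq_iff_iff, PySem.Chars.startswith_iff, PySem.Chars.endswith_iff, List.reverse_prefix]

theorem pv_sw_short (cs p : List Char) (h : cs.length < p.length) : PySem.Chars.startswith cs p = false := by
  rw [Bool.eq_false_iff, Ne, PySem.Chars.startswith_iff]
  intro hp; have := hp.length_le; omega

theorem pv_ew_short (cs p : List Char) (h : cs.length < p.length) : PySem.Chars.endswith cs p = false := by
  rw [Bool.eq_false_iff, Ne, PySem.Chars.endswith_iff]
  intro hp; have := hp.length_le; omega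

theorem pv_startswith3 (a b c x y z : Char) (rest : List Char) :
    PySem.Chars.startswith (a::b::c::rest) [x,y,z] = (decide (a = x) && decide (b = y) && decide (c = z)) := by
  rw [Bool.eq_iff_iff, PySem.Chars.startswith_iff]
  simp [List.cons_prefix_cons]
  tauto

theorem pv_isIn_vowels (ch : Char) :
    PySem.Chars.isIn [ch] "aeiou".toList
      = (decide (ch = 'a') || decide (ch = 'e') || decide (ch = 'i') || decide (ch = 'o') || decide (ch = 'u')) := by
  rw [Bool.eq_iff_iff, PySem.Chars.isIn_iff_infix]
  constructor
  · intro h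
    rcases h with ⟨s, t, hst⟩
    have : ch ∈ "aeiou".toList := by rw [← hst]; simp
    simp at this ⊢; tauto
  · intro h
    simp at h
    have hm : ch ∈ "aeiou".toList := by simp; tauto
    obtain ⟨s, t, hst⟩ := List.append_of_mem hm
    exact ⟨s, t, by simp [hst]⟩

-- one prefix group of A collapses to initial-letter test && vowel test && hyphen test
theorem pv_group (a b c x : Char) (rest : List Char) :
    (PySem.Chars.startswith (a::b::c::rest) [x,'a','-'] ||
     (PySem.Chars.startswith (a::b::c::rest) [x,'e','-'] ||
      (PySem.Chars.startswith (a::b::c::rest) [x,'i','-'] ||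
       (PySem.Chars.startswith (a::b::c::rest) [x,'o','-'] ||
        PySem.Chars.startswith (a::b::c::rest) [x,'u','-']))))
    = (decide (a = x) && PySem.Chars.isIn [b] "aeiou".toList && decide (c = '-')) := by
  simp only [pv_startswith3, pv_isIn_vowels]
  rw [Bool.eq_iff_iff]
  simp
  tauto

theorem pv_tail (cs : List Char) :
    (if (PySem.Chars.endswith cs ['-','i','r','e'] || PySem.Chars.endswith cs ['-','e','t','e']) = true then
        PySem.Dict.empty.insert "tense" "past"
      else if (PySem.Chars.endswith cs ['-','a','g','a'] || PySem.Chars.endswith cs ['-','i','a']) = true then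
        PySem.Dict.empty.insert "aspect" "habitual"
      else PySem.Dict.empty).items =
    (if (PySem.Chars.endswith cs ['-','i','r','e'] || PySem.Chars.endswith cs ['-','e','t','e']) = true then
        [(("tense":String), ("past":String))]
      else if (PySem.Chars.endswith cs ['-','a','g','a'] || PySem.Chars.endswith cs ['-','i','a']) = true then
        [(("aspect":String), ("habitual":String))]
      else []) := by
  split_ifs <;> rfl

set_option maxHeartbeats 1000000 in
theorem pv_main (word : String) : analyze_morphology_py word = analyze_morphology_py_alt word := by
  unfold analyze_morphology_py analyze_morphology_py_alt
  rw [PySem.Str.slice?_none_none_neg_one]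
  simp only [PySem.Str.startswith_eq, PySem.Str.endswith_eq, PySem.Str.pyGet?_eq,
    PySem.Chars.pyGet?_eq_listPyGet?, PySem.Str.len_eq,
    String.toList_ofList, List.any_cons, List.any_nil, Bool.or_false]
  simp only [show ("wa-":String).toList = ['w','a','-'] from rfl,
    show ("we-":String).toList = ['w','e','-'] from rfl,
    show ("wi-":String).toList = ['w','i','-'] from rfl,
    show ("wo-":String).toList = ['w','o','-'] from rfl,
    show ("wu-":String).toList = ['w','u','-'] from rfl,
    show ("ka-":String).toList = ['k','a','-'] from rfl,
    show ("ke-":String).toList = ['k','e','-'] from rfl,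
    show ("ki-":String).toList = ['k','i','-'] from rfl,
    show ("ko-":String).toList = ['k','o','-'] from rfl,
    show ("ku-":String).toList = ['k','u','-'] from rfl,
    show ("ma-":String).toList = ['m','a','-'] from rfl,
    show ("me-":String).toList = ['m','e','-'] from rfl,
    show ("mi-":String).toList = ['m','i','-'] from rfl,
    show ("mo-":String).toList = ['m','o','-'] from rfl,
    show ("mu-":String).toList = ['m','u','-'] from rfl,
    show ("-ire":String).toList = ['-','i','r','e'] from rfl,
    show ("-ete":String).toList = ['-','e','t','e'] from rfl,
    show ("-aga":String).toList = ['-','a','g','a'] from rfl,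
    show ("-ia":String).toList = ['-','i','a'] from rfl,
    show ("eri-":String).toList = (['-','i','r','e'] : List Char).reverse from rfl,
    show ("ete-":String).toList = (['-','e','t','e'] : List Char).reverse from rfl,
    show ("aga-":String).toList = (['-','a','g','a'] : List Char).reverse from rfl,
    show ("ai-":String).toList = (['-','i','a'] : List Char).reverse from rfl]
  simp only [pv_startswith_reverse]
  generalize word.toList = cs
  match cs with
  | [] => simp [pv_sw_short, pv_ew_short, PySem.Dict.empty]
  | [a] => simp [pv_sw_short, pv_ew_short, PySem.Dict.empty]
  | [a, b] => simp [pv_sw_short, pv_ew_short, PySem.Dict.empty]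
  | a :: b :: c :: rest =>
    rw [pv_group a b c 'w' rest, pv_group a b c 'k' rest, pv_group a b c 'm' rest]
    have h3 : (3:Int) ≤ ((a :: b :: c :: rest).length : Int) := by simp; omega
    have h2 : PySem.List.pyGet? (a::b::c::rest) 2 = some c := by
      simp [PySem.List.pyGet?, PySem.List.pyIdx?, show (2:Int) ≤ (rest.length:Int)+1+1 by omega]
    have h1 : PySem.List.pyGet? (a::b::c::rest) 1 = some b := by
      simp [PySem.List.pyGet?, PySem.List.pyIdx?, show (0:Int) ≤ (rest.length:Int)+1 by omega]
    have h0 : PySem.List.pyGet? (a::b::c::rest) 0 = some a := by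
      simp [PySem.List.pyGet?, PySem.List.pyIdx?, show (0:Int) ≤ (rest.length:Int)+1+1 by omega]
    have etab : pvTypeByInitial = PySem.Dict.mk [('w',"personal"),('k',"diminutive"),('m',"plural")] := by decide
    simp only [h0, h1, h2, h3, etab, Option.any_some, true_and, Option.some.injEq]
    by_cases hc : c = '-'
    · subst hc
      simp only [decide_true, Bool.and_true, true_and]
      cases hv : PySem.Chars.isIn [b] "aeiou".toList
      · simp only [Bool.and_false]
        simpa using pv_tail (a :: b :: '-' :: rest)
      · by_cases haw : a = 'w'
        · subst haw
          simp [PySem.Dict.get?_mk_cons, PySem.Dict.insert, PySem.Dict.empty]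
        · by_cases hak : a = 'k'
          · subst hak
            simp [PySem.Dict.get?_mk_cons, PySem.Dict.insert, PySem.Dict.empty]
          · by_cases ham : a = 'm'
            · subst ham
              simp [PySem.Dict.get?_mk_cons, PySem.Dict.insert, PySem.Dict.empty]
            · have gnone : (PySem.Dict.mk [('w',("personal":String)),('k',"diminutive"),('m',"plural")]).get? a = none := by
                have bw : ('w' == a) = false := by simp; exact fun h => haw h.symm
                have bk : ('k' == a) = false := by simp; exact fun h => hak h.symm
                have bm : ('m' == a) = false := by simp; exact fun h => ham h.symm
                rw [PySem.Dict.get?_mk_cons, bw, if_neg (by simp), PySem.Dict.get?_mk_cons, bk,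
                    if_neg (by simp), PySem.Dict.get?_mk_cons, bm, if_neg (by simp)]
                rfl
              simp only [Bool.and_true]
              have dw : decide (a = 'w') = false := by simp [haw]
              have dk : decide (a = 'k') = false := by simp [hak]
              have dm : decide (a = 'm') = false := by simp [ham]
              simp only [dw, dk, dm, Bool.false_eq_true, if_false]
              simpa [gnone] using pv_tail (a :: b :: '-' :: rest)
    · simp only [hc, false_and]
      simpa using pv_tail (a :: b :: c :: rest)

-- ===== VERDICT (by name: the statement is the Claim_ definition above) =====
theorem analyze_morphology_py_spec : Claim_equal_analyze_morphology_py := by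
  intro word _
  unfold Spec_analyze_morphology_py
  exact pv_main word
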